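-- pv_equiv track=rewrite | github.com/RobertaBtt/PythonProblemSolving | src/Codility/Lessons/05MashroomPicker.py | mushrooms
-- ===== SOURCE A (Python) =====
-- def prefix_sum(A):
--     n = len(A)
--     P =  [0] * (n+1)
--     for k in range(1,n+1):
--         P[k] = P[k-1] + A[k-1]
--     return P
--
-- def count_total(P, x, y):
--     return P[y+1] - P[x]
--
-- def mushrooms(A, k, m):
--     n = len(A)
--     result = 0
--     pref = prefix_sum(A)
--     for p in range (min(m,k) + 1):
--         left_pos = k - p
--         right_pos = min (n-1, max(k,k+m-2*p))
--         result = max(result, count_total(pref, left_pos, right_pos))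
--
--     for p in range(min(m + 1, n-k)):
--         right_pos = k + p
--         left_pos = max(0, min(k,k-(m-2*p)))
--         result = max(result, count_total(pref, left_pos, right_pos))
--
--     return result
-- ===== SOURCE B (Python) =====
-- def mushrooms(A, k, m):
--     # Same two candidate ranges, but no prefix-sum table: each window is
--     # summed directly with a slice (simpler: the helper functions disappear).
--     n = len(A)
--     best = 0
--     for p in range(min(m, k) + 1):
--         best = max(best, sum(A[k - p : min(n - 1, max(k, k + m - 2 * p)) + 1]))
--     for p in range(min(m + 1, n - k)):
--         best = max(best, sum(A[max(0, min(k, k - (m - 2 * p))) : k + p + 1]))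
--     return best
-- ===== Notes on version B (the rewrite author's own statement) =====
-- stated objective: simpler
-- what changed: Removed the prefix_sum table and the count_total helper entirely: each candidate interval is summed directly with a slice, so no auxiliary O(n) table is built or queried.
-- outside the precondition, e.g. on mushrooms([3, 1, 4], -4, 3): A returns 8, B returns 4
import Mathlib
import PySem

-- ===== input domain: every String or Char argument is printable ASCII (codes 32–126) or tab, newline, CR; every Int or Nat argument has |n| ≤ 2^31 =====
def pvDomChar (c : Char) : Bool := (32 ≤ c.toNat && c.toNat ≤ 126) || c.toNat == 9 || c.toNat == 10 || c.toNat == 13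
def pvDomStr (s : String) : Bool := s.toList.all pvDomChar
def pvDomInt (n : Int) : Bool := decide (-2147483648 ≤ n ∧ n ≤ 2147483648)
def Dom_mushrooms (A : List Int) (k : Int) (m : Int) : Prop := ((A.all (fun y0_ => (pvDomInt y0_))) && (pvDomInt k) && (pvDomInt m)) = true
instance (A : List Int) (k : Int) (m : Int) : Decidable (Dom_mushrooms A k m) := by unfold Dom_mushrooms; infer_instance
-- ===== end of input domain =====

-- B removes the prefix-sum table and sums each candidate window directly with a slice (simpler; return value only, no mutation involved).

-- ===== PORT A =====
-- prefix_sum(A): P = [0]*(n+1); for k in range(1, n+1): P[k] = P[k-1] + A[k-1]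
-- (list assignment P[k] = … ported with PySem.List.pySetD; every index this loop uses is in range in Python, so no exception is possible here)
def prefixSumA (A : List Int) : List Int :=
  let n : Int := (A.length : Int)
  let P : List Int := List.replicate (A.length + 1) 0
  (PySem.List.pyRange 1 (n + 1) 1).foldl
    (fun P j => PySem.List.pySetD P j (PySem.List.pyGetD P (j - 1) 0 + PySem.List.pyGetD A (j - 1) 0)) P

-- count_total(P, x, y) = P[y+1] - P[x]; out-of-range indices raise in Python and are excluded by Pre_
def countTotalA (P : List Int) (x y : Int) : Int :=
  PySem.List.pyGetD P (y + 1) 0 - PySem.List.pyGetD P x 0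

def mushrooms (A : List Int) (k : Int) (m : Int) : Int :=
  let n : Int := (A.length : Int)
  let pref := prefixSumA A
  let result : Int := 0
  let result := (PySem.List.pyRange 0 (min m k + 1) 1).foldl
    (fun result p =>
      let left_pos := k - p
      let right_pos := min (n - 1) (max k (k + m - 2 * p))
      max result (countTotalA pref left_pos right_pos)) result
  let result := (PySem.List.pyRange 0 (min (m + 1) (n - k)) 1).foldl
    (fun result p =>
      let right_pos := k + p
      let left_pos := max 0 (min k (k - (m - 2 * p)))
      max result (countTotalA pref left_pos right_pos)) result
  result

-- ===== PORT B =====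
def mushrooms_alt (A : List Int) (k : Int) (m : Int) : Int :=
  let n : Int := (A.length : Int)
  let best : Int := 0
  let best := (PySem.List.pyRange 0 (min m k + 1) 1).foldl
    (fun best p =>
      max best (PySem.List.slice A (some (k - p)) (some (min (n - 1) (max k (k + m - 2 * p)) + 1))).sum) best
  let best := (PySem.List.pyRange 0 (min (m + 1) (n - k)) 1).foldl
    (fun best p =>
      max best (PySem.List.slice A (some (max 0 (min k (k - (m - 2 * p))))) (some (k + p + 1))).sum) best
  best

-- ===== PRECONDITION & SPEC =====
-- Pre_ excludes k ≤ -2 with m ≥ 0 (A reads the prefix table through Python's negative-index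
-- wraparound and returns accidental values) and k > n with m ≥ 0 (A raises IndexError).
def Pre_mushrooms (A : List Int) (k : Int) (m : Int) : Prop :=
  0 ≤ m → (-1 ≤ k ∧ k ≤ (A.length : Int))
instance (A : List Int) (k : Int) (m : Int) : Decidable (Pre_mushrooms A k m) := by
  unfold Pre_mushrooms; infer_instance
def pvWitness_mushrooms : List Int × Int × Int := ([2, 3, 7, 5, 1, 7], 4, 3)

def Spec_mushrooms (A : List Int) (k : Int) (m : Int) (out : Int) : Prop := out = mushrooms_alt A k m
instance (A : List Int) (k : Int) (m : Int) (out : Int) : Decidable (Spec_mushrooms A k m out) := by unfold Spec_mushrooms; infer_instance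

-- ===== CLAIM (what is proved, stated in full; the proofs are below) =====
def Claim_equal_mushrooms : Prop := ∀ (A : List Int) (k : Int) (m : Int), Dom_mushrooms A k m → Pre_mushrooms A k m → Spec_mushrooms A k m (mushrooms A k m)

-- ===== LEMMAS AND PROOFS =====

-- the partial prefix table after the first j loop iterations
def prefPartial (A : List Int) (j : Nat) : List Int :=
  (List.range (A.length + 1)).map (fun i => if i ≤ j then (A.take i).sum else 0)

-- one loop iteration advances the partial table
theorem prefStep (A : List Int) (j : Nat) (hj : j < A.length) :
    PySem.List.pySetD (prefPartial A j) ((j : Int) + 1)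
      (PySem.List.pyGetD (prefPartial A j) ((j : Int) + 1 - 1) 0 +
        PySem.List.pyGetD A ((j : Int) + 1 - 1) 0) = prefPartial A (j + 1) := by
  have e1 : ((j : Int) + 1 - 1) = ((j : Nat) : Int) := by omega
  have e2 : ((j : Int) + 1) = (((j + 1 : Nat)) : Int) := by omega
  rw [e1, e2, PySem.List.pySetD_natCast, PySem.List.pyGetD_natCast, PySem.List.pyGetD_natCast]
  have hgP : (prefPartial A j).getD j 0 = (A.take j).sum := by
    simp [prefPartial, List.getD, Nat.lt_succ_of_lt hj]
  have hgA : A.getD j 0 = A[j] := by simp [List.getD, hj]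
  rw [hgP, hgA]
  apply List.ext_getElem
  · simp [prefPartial]
  · intro i hi1 hi2
    simp only [prefPartial, List.length_set, List.length_map, List.length_range] at hi1
    rw [List.getElem_set]
    simp only [prefPartial, List.getElem_map, List.getElem_range]
    split_ifs with h1 h2 h3 h4 h5
    · subst h1
      rw [List.take_add_one]
      simp [hj]
    · subst h1; omega
    · rfl
    · omega
    · omega
    · rfl

-- downward induction over the remaining loop iterations
theorem prefAux (A : List Int) (d j : Nat) (hd : A.length = j + d) :
    (PySem.List.pyRange ((j : Int) + 1) ((A.length : Int) + 1) 1).foldl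
      (fun P x => PySem.List.pySetD P x (PySem.List.pyGetD P (x - 1) 0 + PySem.List.pyGetD A (x - 1) 0))
      (prefPartial A j)
    = (List.range (A.length + 1)).map (fun i => (A.take i).sum) := by
  induction d generalizing j with
  | zero =>
    rw [PySem.List.pyRange_one_eq_nil (by omega)]
    simp only [List.foldl_nil, prefPartial]
    apply List.map_congr_left
    intro i hi
    rw [List.mem_range] at hi
    rw [if_pos (by omega)]
  | succ d ih =>
    rw [PySem.List.pyRange_one_cons (by omega)]
    rw [List.foldl_cons, prefStep A j (by omega)]
    have e : ((j : Int) + 1 + 1) = (((j + 1 : Nat)) : Int) + 1 := by omega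
    rw [e, ih (j + 1) (by omega)]

-- The prefix table equals the map of partial sums.
theorem prefixSumA_eq (A : List Int) :
    prefixSumA A = (List.range (A.length + 1)).map (fun i => (A.take i).sum) := by
  have init : List.replicate (A.length + 1) (0 : Int) = prefPartial A 0 := by
    apply List.ext_getElem
    · simp [prefPartial]
    · intro i hi1 hi2
      simp only [prefPartial, List.getElem_replicate, List.getElem_map, List.getElem_range]
      split_ifs with h
      · interval_cases i; simp
      · rfl
  unfold prefixSumA
  simp only []
  rw [init]
  have h := prefAux A A.length 0 (by omega)
  norm_num at h
  exact h

-- pyGetD on the prefix table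
theorem pref_get (A : List Int) (i : Int) (h0 : 0 ≤ i) (h1 : i ≤ (A.length : Int)) :
    PySem.List.pyGetD (prefixSumA A) i 0 = (A.take i.toNat).sum := by
  rw [prefixSumA_eq]
  have e : i = ((i.toNat : Nat) : Int) := by omega
  rw [e, PySem.List.pyGetD_natCast]
  have hlt : i.toNat < A.length + 1 := by omega
  simp [List.getD, hlt]
  rw [show max i 0 = i from by omega]

-- count_total equals the slice sum on in-range bounds
theorem count_eq_slice (A : List Int) (l r : Int) (h0 : 0 ≤ l) (h1 : l ≤ r + 1)
    (h2 : r + 1 ≤ (A.length : Int)) :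
    countTotalA (prefixSumA A) l r = (PySem.List.slice A (some l) (some (r + 1))).sum := by
  unfold countTotalA
  rw [pref_get A (r + 1) (by omega) h2, pref_get A l h0 (by omega)]
  rw [PySem.List.slice_toNat A h0 (by omega)]
  have hsplit : A.take (r + 1).toNat = A.take l.toNat ++ (A.drop l.toNat).take ((r + 1).toNat - l.toNat) := by
    rw [← List.take_add]
    congr 1
    omega
  rw [hsplit, List.sum_append]
  ring

-- ===== VERDICT (by name: the statement is the Claim_ definition above) =====
theorem mushrooms_spec : Claim_equal_mushrooms := by
  intro A k m _ hpre
  unfold Spec_mushrooms mushrooms mushrooms_alt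
  simp only []
  by_cases hm : 0 ≤ m
  · obtain ⟨hk1, hk2⟩ := hpre hm
    have h1 : (PySem.List.pyRange 0 (min m k + 1) 1).foldl
        (fun result p =>
          max result (countTotalA (prefixSumA A) (k - p)
            (min ((A.length : Int) - 1) (max k (k + m - 2 * p))))) 0
      = (PySem.List.pyRange 0 (min m k + 1) 1).foldl
        (fun best p =>
          max best (PySem.List.slice A (some (k - p))
            (some (min ((A.length : Int) - 1) (max k (k + m - 2 * p)) + 1))).sum) 0 := by
      apply PySem.List.foldl_congr_mem
      intro acc p hp
      rw [PySem.List.mem_pyRange_one] at hp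
      congr 1
      refine count_eq_slice A _ _ ?_ ?_ ?_ <;> omega
    rw [h1]
    apply PySem.List.foldl_congr_mem
    intro acc p hp
    rw [PySem.List.mem_pyRange_one] at hp
    congr 1
    refine count_eq_slice A _ _ ?_ ?_ ?_ <;> omega
  · rw [PySem.List.pyRange_one_eq_nil (a := 0) (b := min m k + 1) (by omega),
        PySem.List.pyRange_one_eq_nil (a := 0) (b := min (m + 1) ((A.length : Int) - k)) (by omega)]
    simp
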